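-- pv_equiv track=rewrite | github.com/BurakErdilli/AlgoExpertPractice | compresSlogan.py | merge_repeating_substrings
-- ===== SOURCE A (Python) =====
-- def merge_repeating_substrings(string):
--     n = len(string)
--     i = 0
--
--     # Function to find the longest repeating substring starting at index i
--     def find_repeat(i):
--         for length in range(2, (n - i) // 2 + 1):
--             substring = string[i:i+length]
--             if string[i+length:i+2*length] == substring:
--                 return substring, length
--         return None, 0
--
--     result = []
--
--     while i < n:
--         # Try to find the longest repeating substring
--         substring, length = find_repeat(i)
--
--         if substring:
--             # If found, add the substring only once and skip the repeated part
--             result.append(substring)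
--             i += 2 * length  # Skip the repeated part
--         else:
--             # If no repeat, add the current character to the result
--             result.append(string[i])
--             i += 1
--
--     return ''.join(result)
-- ===== SOURCE B (Python) =====
-- def merge_repeating_substrings(string):
--     n = len(string)
--     best = [0] * n
--     row = {}   # k -> LCE of the suffixes at i+1 and i+1+k (keys: positions matching string[i+1])
--     seen = {}  # char -> indices j > i with string[j] == char, most recent first
--     for i in range(n - 1, -1, -1):
--         c = string[i]
--         js = seen.get(c, [])
--         nrow = {}
--         b = 0
--         lim = (n - i) // 2
--         for j in reversed(js):
--             k = j - i
--             v = row.get(k, 0) + 1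
--             nrow[k] = v
--             if b == 0 and 2 <= k <= lim and v >= k:
--                 b = k
--         row = nrow
--         best[i] = b
--         js.append(i)
--         seen[c] = js
--     parts = []
--     i = 0
--     while i < n:
--         L = best[i]
--         if L:
--             parts.append(string[i:i + L])
--             i += 2 * L
--         else:
--             parts.append(string[i])
--             i += 1
--     return ''.join(parts)
-- ===== Notes on version B (the rewrite author's own statement) =====
-- stated objective: faster
-- what changed: A rescans and re-slices candidate doubled blocks at every position (worst-case cubic); B sweeps the string once backwards, maintaining a sparse longest-common-extension dict over a per-character occurrence index to record the smallest doubled-block length at every position, then emits the result in one forward pass.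
import Mathlib
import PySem

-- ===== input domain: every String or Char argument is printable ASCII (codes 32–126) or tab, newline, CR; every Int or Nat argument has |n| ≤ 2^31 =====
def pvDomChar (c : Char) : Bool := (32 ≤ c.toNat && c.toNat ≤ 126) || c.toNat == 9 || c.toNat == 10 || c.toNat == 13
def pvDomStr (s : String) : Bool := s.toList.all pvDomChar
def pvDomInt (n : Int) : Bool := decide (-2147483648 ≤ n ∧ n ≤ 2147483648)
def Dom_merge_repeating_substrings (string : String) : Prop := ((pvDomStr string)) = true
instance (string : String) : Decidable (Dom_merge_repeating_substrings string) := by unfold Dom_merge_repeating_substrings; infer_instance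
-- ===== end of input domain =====

-- B replaces A's per-position slice-comparison scan by a backward sparse longest-common-extension
-- table over a per-character occurrence index, plus one forward pass (objective: faster).

-- ===== PORT A =====
-- find_repeat's for-loop with early return, over the precomputed range list
def pvFindA (cs : List Char) (i : Int) : List Int → Option (List Char) × Int
  | [] => (none, 0)
  | length :: rest =>
    let substring := PySem.List.slice cs (some i) (some (i + length))
    if PySem.List.slice cs (some (i + length)) (some (i + 2 * length)) = substring then
      (some substring, length)
    else pvFindA cs i rest

-- the while-loop; fuel n+1 is enough since i strictly increases while i < n.
-- `if substring:` — find_repeat never returns an empty string (slices of length ≥ 2 at i < n),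
-- so matching on the Option is Python's truthiness test.  string[i] is in range (0 ≤ i < n),
-- so the .elim default of pyGet? is never taken.
def pvLoopA (cs : List Char) (n : Int) : Nat → Int → List (List Char) → List (List Char)
  | 0, _, result => result
  | fuel + 1, i, result =>
    if i < n then
      match pvFindA cs i (PySem.List.pyRange 2 (PySem.Int.floordiv (n - i) 2 + 1) 1) with
      | (some substring, length) => pvLoopA cs n fuel (i + 2 * length) (result ++ [substring])
      | (none, _) => pvLoopA cs n fuel (i + 1) (result ++ [(PySem.List.pyGet? cs i).elim [] (fun c => [c])])
    else result

def merge_repeating_substrings (string : String) : String :=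
  let cs := string.toList
  let n : Int := cs.length
  String.ofList (PySem.Chars.join [] (pvLoopA cs n (cs.length + 1) 0 []))

-- ===== PORT B =====
-- one iteration of B's backward loop; state is (best, row, seen) — i runs downward, so writing
-- slot i of the preallocated best list is prepending.  `seen[c]` holds the indices j > i with
-- string[j] == c, most recent first, so `reversed(js)` is ascending;  `row`/`nrow` are the sparse
-- LCE dicts.  string[i] is in range (0 ≤ i < n), so the .elim default of pyGet? is never taken.
def pvStepB (cs : List Char) (n : Int)
    (st : List Int × PySem.Dict Int Int × PySem.Dict Char (List Int)) (i : Int) :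
    List Int × PySem.Dict Int Int × PySem.Dict Char (List Int) :=
  let c := (PySem.List.pyGet? cs i).elim ' ' id
  let js := st.2.2.getD c []
  let lim := PySem.Int.floordiv (n - i) 2
  let inner := js.reverse.foldl
      (fun (st2 : PySem.Dict Int Int × Int) j =>
        let k := j - i
        let v := st.2.1.getD k 0 + 1
        (st2.1.insert k v,
          if st2.2 = 0 ∧ 2 ≤ k ∧ k ≤ lim ∧ k ≤ v then k else st2.2))
      (PySem.Dict.empty, 0)
  (inner.2 :: st.1, inner.1, st.2.2.insert c (js ++ [i]))

-- the forward pass; fuel n+1 again suffices (i strictly increases while i < n)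
def pvLoopB (cs : List Char) (n : Int) (best : List Int) : Nat → Int → List (List Char) → List (List Char)
  | 0, _, parts => parts
  | fuel + 1, i, parts =>
    if i < n then
      let L := PySem.List.pyGetD best i 0
      if L ≠ 0 then
        pvLoopB cs n best fuel (i + 2 * L) (parts ++ [PySem.List.slice cs (some i) (some (i + L))])
      else
        pvLoopB cs n best fuel (i + 1) (parts ++ [(PySem.List.pyGet? cs i).elim [] (fun c => [c])])
    else parts

def merge_repeating_substrings_alt (string : String) : String :=
  let cs := string.toList
  let n : Int := cs.length
  let st := ((PySem.List.pyRange (n - 1) (-1) (-1)).foldl (pvStepB cs n)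
               ([], PySem.Dict.empty, PySem.Dict.empty))
  String.ofList (PySem.Chars.join [] (pvLoopB cs n st.1 (cs.length + 1) 0 []))

-- ===== PRECONDITION & SPEC =====
def Spec_merge_repeating_substrings (string : String) (out : String) : Prop := out = merge_repeating_substrings_alt string
instance (string : String) (out : String) : Decidable (Spec_merge_repeating_substrings string out) := by unfold Spec_merge_repeating_substrings; infer_instance

-- ===== CLAIM (what is proved, stated in full; the proofs are below) =====
def Claim_equal_merge_repeating_substrings : Prop := ∀ (string : String), Dom_merge_repeating_substrings string → Spec_merge_repeating_substrings string (merge_repeating_substrings string)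

-- ===== LEMMAS AND PROOFS =====

-- length of the longest common prefix of two lists
def pvLcp (a b : List Char) : Nat :=
  match a, b with
  | x :: a', y :: b' => if x = y then pvLcp a' b' + 1 else 0
  | _, _ => 0

-- longest common extension of the suffixes at i and i+k
def pvLce (cs : List Char) (i k : Nat) : Nat := pvLcp (cs.drop i) (cs.drop (i + k))

-- the search both sides perform at position i (0 = "no doubled block")
def pvBestSpec (cs : List Char) (i : Nat) : Int :=
  ((PySem.List.pyRange 2 (PySem.Int.floordiv ((cs.length : Int) - i) 2 + 1) 1).find?
    (fun k => decide (k ≤ (pvLce cs i k.toNat : Int)))).getD 0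

-- what seen[c] holds after the iteration for position i
def pvSeen (cs : List Char) (i : Nat) (c : Char) : List Int :=
  (((List.range' i (cs.length - i)).filter (fun j => cs[j]? = some c)).reverse).map (fun (j : Nat) => (j : Int))

-- the loop invariant of B's backward fold, after position i has been processed
def pvInv (cs : List Char) (i : Nat)
    (st : List Int × PySem.Dict Int Int × PySem.Dict Char (List Int)) : Prop :=
  st.1 = (List.range' i (cs.length - i)).map (fun x => pvBestSpec cs x)
  ∧ (∀ kN : Nat, 1 ≤ kN → st.2.1.getD (kN : Int) 0 = (pvLce cs i kN : Int))
  ∧ (∀ c : Char, st.2.2.getD c [] = pvSeen cs i c)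

lemma pvLcp_ge_iff (k : Nat) : ∀ (a b : List Char), k ≤ b.length →
    (k ≤ pvLcp a b ↔ a.take k = b.take k) := by
  induction k with
  | zero => simp
  | succ k ih =>
    intro a b hb
    match a, b with
    | _, [] => simp at hb
    | [], y :: b' => simp [pvLcp]
    | x :: a', y :: b' =>
      by_cases hxy : x = y
      · subst hxy
        simp only [pvLcp, if_true, List.take_succ_cons, List.cons.injEq, true_and,
          Nat.add_le_add_iff_right]
        exact ih a' b' (by simpa using hb)
      · simp [pvLcp, hxy]

lemma pvLce_zero (cs : List Char) (i k : Nat) (h : cs.length ≤ i + k) : pvLce cs i k = 0 := by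
  unfold pvLce
  rw [List.drop_eq_nil_of_le h]
  cases cs.drop i <;> rfl

lemma pvLce_rec (cs : List Char) (i k : Nat) (hi : i < cs.length) :
    pvLce cs i k = if i + k < cs.length ∧ cs[i]? = cs[i + k]? then pvLce cs (i + 1) k + 1 else 0 := by
  unfold pvLce
  rw [List.drop_eq_getElem_cons hi]
  by_cases h : i + k < cs.length
  · rw [List.drop_eq_getElem_cons h]
    simp only [pvLcp]
    have : i + k + 1 = (i + 1) + k := by omega
    rw [this]
    simp [h, List.getElem?_eq_getElem hi]
  · rw [List.drop_eq_nil_of_le (show cs.length ≤ i + k by omega)]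
    simp [pvLcp, h]

-- a positive LCE pins the matching character and its bound
lemma pvLce_pos (cs : List Char) (i k : Nat) (hi : i < cs.length) (h : 1 ≤ pvLce cs i k) :
    i + k < cs.length ∧ cs[i]? = cs[i + k]? := by
  by_contra hcon
  rw [pvLce_rec cs i k hi, if_neg hcon] at h
  omega

lemma pvFindA_eq (cs : List Char) (i : Int) (ks : List Int) (p : Int → Bool)
    (hp : ∀ L ∈ ks, (PySem.List.slice cs (some (i + L)) (some (i + 2 * L)) = PySem.List.slice cs (some i) (some (i + L))) ↔ p L = true) :
    pvFindA cs i ks = (match ks.find? p with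
      | some L => (some (PySem.List.slice cs (some i) (some (i + L))), L)
      | none => (none, 0)) := by
  induction ks with
  | nil => rfl
  | cons L rest ih =>
    by_cases hL : p L = true
    · rw [List.find?_cons_of_pos hL]
      simp only [pvFindA, if_pos ((hp L (by simp)).mpr hL)]
    · rw [List.find?_cons_of_neg (by simp [hL])]
      simp only [pvFindA, if_neg (fun hh => hL ((hp L (by simp)).mp hh))]
      exact ih (fun L' hL' => hp L' (by simp [hL']))

-- A's slice comparison at i with block length lN is a longest-common-extension query
lemma pvCond_iff (cs : List Char) (iN lN : Nat) (hle : iN + 2 * lN ≤ cs.length) :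
    (PySem.List.slice cs (some ((iN : Int) + lN)) (some ((iN : Int) + 2 * lN))
        = PySem.List.slice cs (some (iN : Int)) (some ((iN : Int) + lN)))
      ↔ lN ≤ pvLce cs iN lN := by
  have h1 : ((iN : Int) + lN) = ((iN + lN : Nat) : Int) := by push_cast; ring
  have h2 : ((iN : Int) + 2 * lN) = ((iN + lN + lN : Nat) : Int) := by push_cast; ring
  rw [h1, h2, PySem.List.slice_natCast, PySem.List.slice_natCast]
  have e1 : iN + lN + lN - (iN + lN) = lN := by omega
  have e2 : iN + lN - iN = lN := by omega
  rw [e1, e2]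
  rw [pvLce, pvLcp_ge_iff lN _ _ (by simp; omega)]
  constructor <;> (intro h; exact h.symm)

-- A's search at position i, characterised by the common best value
lemma pvBest_agree (cs : List Char) (iN : Nat) :
    pvFindA cs (iN : Int)
        (PySem.List.pyRange 2 (PySem.Int.floordiv ((cs.length : Int) - iN) 2 + 1) 1)
      = (if pvBestSpec cs iN = 0 then (none, 0)
         else (some (PySem.List.slice cs (some (iN : Int)) (some ((iN : Int) + pvBestSpec cs iN))), pvBestSpec cs iN)) := by
  rw [pvFindA_eq cs (iN : Int) _ (fun k => decide (k ≤ (pvLce cs iN k.toNat : Int)))]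
  · unfold pvBestSpec
    cases hfind : (PySem.List.pyRange 2 (PySem.Int.floordiv ((cs.length : Int) - iN) 2 + 1) 1).find?
        (fun k => decide (k ≤ (pvLce cs iN k.toNat : Int))) with
    | none => simp
    | some L =>
      have hmem := List.mem_of_find?_eq_some hfind
      have h2 : 2 ≤ L := (PySem.List.mem_pyRange_one.mp hmem).1
      simp only [Option.getD_some]
      rw [if_neg (by omega)]
  · intro L hmem
    obtain ⟨h2, hub⟩ := PySem.List.mem_pyRange_one.mp hmem
    have hle : L * 2 ≤ (cs.length : Int) - iN :=
      (PySem.Int.le_floordiv_iff_mul_le (by norm_num)).mp (by omega)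
    obtain ⟨lN, hL⟩ : ∃ m : Nat, L = (m : Int) := ⟨L.toNat, by omega⟩
    subst hL
    have hle' : iN + 2 * lN ≤ cs.length := by omega
    rw [pvCond_iff cs iN lN hle']
    simp only [Int.toNat_natCast]
    constructor
    · intro h; simpa using h
    · intro h; have := of_decide_eq_true h; omega

lemma pvBestSpec_nonneg (cs : List Char) (i : Nat) :
    pvBestSpec cs i = 0 ∨ 2 ≤ pvBestSpec cs i := by
  unfold pvBestSpec
  cases hfind : (PySem.List.pyRange 2 (PySem.Int.floordiv ((cs.length : Int) - i) 2 + 1) 1).find?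
      (fun k => decide (k ≤ (pvLce cs i k.toNat : Int))) with
  | none => simp
  | some L =>
    have hmem := List.mem_of_find?_eq_some hfind
    have h2 : 2 ≤ L := (PySem.List.mem_pyRange_one.mp hmem).1
    simp only [Option.getD_some]
    omega

-- find? is the head of the filtered list
lemma pvFind_filter (p : Int → Bool) : ∀ (l : List Int), l.find? p = (l.filter p).head? := by
  intro l
  induction l with
  | nil => rfl
  | cons x xs ih =>
    by_cases h : p x = true
    · simp [List.find?_cons_of_pos h, List.filter_cons_of_pos h]
    · rw [List.find?_cons_of_neg (by simpa using h), List.filter_cons_of_neg (by simpa using h), ih]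

-- a fold that keeps the first hit, once set, never changes
lemma pvFoldFirst_stay (P : Int → Prop) [DecidablePred P] :
    ∀ (K : List Int) (b : Int), b ≠ 0 →
    K.foldl (fun b k => if b = 0 ∧ P k then k else b) b = b := by
  intro K
  induction K with
  | nil => intro b _; rfl
  | cons k ks ih =>
    intro b hb
    rw [List.foldl_cons, if_neg (show ¬(b = 0 ∧ P k) from fun hh => hb hh.1)]
    exact ih b hb

-- the first-hit fold is find?
lemma pvFoldFirst (P : Int → Prop) [DecidablePred P] :
    ∀ (K : List Int), (∀ k ∈ K, k ≠ 0) →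
    K.foldl (fun b k => if b = 0 ∧ P k then k else b) 0 = (K.find? (fun k => decide (P k))).getD 0 := by
  intro K
  induction K with
  | nil => intro _; rfl
  | cons k ks ih =>
    intro hne
    by_cases hP : P k
    · rw [List.find?_cons_of_pos (by simpa using hP)]
      rw [List.foldl_cons, if_pos (show (0 : Int) = 0 ∧ P k from ⟨rfl, hP⟩), Option.getD_some]
      exact pvFoldFirst_stay P ks k (hne k (by simp))
    · rw [List.find?_cons_of_neg (by simpa using hP)]
      rw [List.foldl_cons, if_neg (show ¬((0 : Int) = 0 ∧ P k) from fun hh => hP hh.2)]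
      exact ih (fun k' hk' => hne k' (by simp [hk']))

-- a fold of inserts keyed by the elements, read back
lemma pvFoldInsert_getD (q : Int) (f : Int → Int) :
    ∀ (Ks : List Int) (d : PySem.Dict Int Int),
    (Ks.foldl (fun d k => d.insert k (f k)) d).getD q 0
      = if q ∈ Ks then f q else d.getD q 0 := by
  intro Ks
  induction Ks with
  | nil => intro d; simp
  | cons k Ks' ih =>
    intro d
    simp only [List.foldl_cons]
    rw [ih]
    by_cases hq : q ∈ Ks'
    · rw [if_pos hq, if_pos (by simp [hq])]
    · by_cases hk : q = k
      · subst hk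
        rw [if_neg hq, if_pos (by simp), PySem.Dict.getD_insert_self]
      · rw [if_neg hq, if_neg (by simp [hk, hq])]
        exact PySem.Dict.getD_insert_of_ne d _ 0 hk
-- the ascending occurrence list at position i (reversal of seen[c])
lemma pvSeen_reverse (cs : List Char) (i : Nat) (c : Char) :
    (pvSeen cs i c).reverse
      = ((List.range' i (cs.length - i)).filter (fun j => cs[j]? = some c)).map (fun (j : Nat) => (j : Int)) := by
  unfold pvSeen
  rw [← List.map_reverse, List.reverse_reverse]

lemma pvSeen_mem (cs : List Char) (i : Nat) (c : Char) (x : Int) :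
    x ∈ pvSeen cs i c ↔ ∃ j : Nat, x = (j : Int) ∧ i ≤ j ∧ j < cs.length ∧ cs[j]? = some c := by
  unfold pvSeen
  simp only [List.mem_map, List.mem_reverse, List.mem_filter, List.mem_range']
  constructor
  · rintro ⟨j, ⟨⟨a, ha, hr⟩, hc⟩, rfl⟩
    exact ⟨j, rfl, by omega, by omega, by simpa using hc⟩
  · rintro ⟨j, rfl, h1, h2, h3⟩
    exact ⟨j, ⟨⟨j - i, by omega, by omega⟩, by simpa using h3⟩, rfl⟩

lemma pvRange_down (n : Nat) :
    PySem.List.pyRange ((n : Int) - 1) (-1) (-1)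
      = (List.range n).map (fun (k : Nat) => ((n : Int) - 1) - (k : Int)) := by
  rcases n with _ | m
  · simp [PySem.List.pyRange]
  · simp only [PySem.List.pyRange]
    norm_num
    rw [if_pos (show (-1 : Int) < (m : Int) by omega)]
    apply List.map_congr_left
    intro k _
    ring

-- pvSeen at i extends pvSeen at i+1 by i itself when the character matches
lemma pvSeen_cons (cs : List Char) (iN : Nat) (c : Char) (hi : iN < cs.length) :
    pvSeen cs iN c
      = pvSeen cs (iN + 1) c ++ (if cs[iN]? = some c then [(iN : Int)] else []) := by
  unfold pvSeen
  have hr : List.range' iN (cs.length - iN) = iN :: List.range' (iN + 1) (cs.length - (iN + 1)) := by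
    have : cs.length - iN = (cs.length - (iN + 1)) + 1 := by omega
    rw [this, List.range'_succ]
  rw [hr]
  by_cases hc : cs[iN]? = some c
  · rw [List.filter_cons_of_pos (by simpa using hc), if_pos hc]
    simp
  · rw [List.filter_cons_of_neg (by simpa using hc), if_neg hc]
    simp

-- membership in the mapped ascending candidate list
lemma pvKk_mem (cs : List Char) (iN : Nat) (hi : iN < cs.length) (x : Int) :
    x ∈ (pvSeen cs (iN + 1) cs[iN]).reverse.map (fun j => j - (iN : Int)) ↔
      (∃ jN : Nat, iN + 1 ≤ jN ∧ jN < cs.length ∧ cs[jN]? = some cs[iN] ∧ x = (jN : Int) - iN) := by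
  simp only [List.mem_map, List.mem_reverse]
  constructor
  · rintro ⟨j, hj, rfl⟩
    obtain ⟨jN, rfl, h1, h2, h3⟩ := (pvSeen_mem cs (iN + 1) cs[iN] j).mp hj
    exact ⟨jN, h1, h2, h3, rfl⟩
  · rintro ⟨jN, h1, h2, h3, rfl⟩
    exact ⟨(jN : Int), (pvSeen_mem cs (iN + 1) cs[iN] _).mpr ⟨jN, rfl, h1, h2, h3⟩, rfl⟩

-- the inner fold's second component is the common best value
lemma pvInner_best (cs : List Char) (iN : Nat) (hi : iN < cs.length)
    (row : PySem.Dict Int Int)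
    (hrow : ∀ kN : Nat, 1 ≤ kN → row.getD (kN : Int) 0 = (pvLce cs (iN + 1) kN : Int)) :
    ((pvSeen cs (iN + 1) cs[iN]).reverse).foldl
        (fun b j => if b = 0 ∧ 2 ≤ j - (iN : Int) ∧ j - (iN : Int) ≤ PySem.Int.floordiv ((cs.length : Int) - (iN : Int)) 2 ∧ j - (iN : Int) ≤ row.getD (j - (iN : Int)) 0 + 1 then j - (iN : Int) else b) 0
      = pvBestSpec cs iN := by
  set lim := PySem.Int.floordiv ((cs.length : Int) - (iN : Int)) 2 with hlim
  set P : Int → Prop := fun k => 2 ≤ k ∧ k ≤ lim ∧ k ≤ row.getD k 0 + 1 with hP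
  have hconv : ((pvSeen cs (iN + 1) cs[iN]).reverse).foldl
        (fun b j => if b = 0 ∧ 2 ≤ j - (iN : Int) ∧ j - (iN : Int) ≤ lim ∧ j - (iN : Int) ≤ row.getD (j - (iN : Int)) 0 + 1 then j - (iN : Int) else b) 0
      = ((pvSeen cs (iN + 1) cs[iN]).reverse.map (fun j => j - (iN : Int))).foldl
        (fun b k => if b = 0 ∧ P k then k else b) 0 :=
    (List.foldl_map (f := fun j => j - (iN : Int))
      (g := fun b k => if b = 0 ∧ P k then k else b)).symm
  rw [hconv]
  rw [pvFoldFirst P _ (by intro k hk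
                          rcases (pvKk_mem cs iN hi k).mp hk with ⟨jN, h1, _, _, rfl⟩
                          omega)]
  unfold pvBestSpec
  rw [pvFind_filter, pvFind_filter]
  have hs1 : List.Pairwise (· < ·)
      (((pvSeen cs (iN + 1) cs[iN]).reverse.map (fun j => j - (iN : Int))).filter (fun k => decide (P k))) := by
    apply List.Pairwise.filter
    rw [pvSeen_reverse, List.map_map, List.pairwise_map]
    refine List.Pairwise.imp ?_ (List.Pairwise.filter _ (List.pairwise_lt_range' 1 (by norm_num)))
    intro a b hab
    simp only [Function.comp]
    omega
  have hs2 : List.Pairwise (· < ·)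
      ((PySem.List.pyRange 2 (lim + 1) 1).filter (fun k => decide (k ≤ (pvLce cs iN k.toNat : Int)))) := by
    apply List.Pairwise.filter
    rw [PySem.List.pyRange_of_pos 2 (lim + 1) (by norm_num), List.pairwise_map]
    refine List.Pairwise.imp ?_ (List.pairwise_lt_range)
    intro a b hab
    omega
  have hset : ∀ x, x ∈ (((pvSeen cs (iN + 1) cs[iN]).reverse.map (fun j => j - (iN : Int))).filter (fun k => decide (P k)))
      ↔ x ∈ ((PySem.List.pyRange 2 (lim + 1) 1).filter (fun k => decide (k ≤ (pvLce cs iN k.toNat : Int)))) := by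
    intro x
    simp only [List.mem_filter]
    constructor
    · rintro ⟨hxm, hxP⟩
      obtain ⟨jN, h1, h2, h3, rfl⟩ := (pvKk_mem cs iN hi _).mp hxm
      obtain ⟨hx2, hxlim, hxv⟩ := of_decide_eq_true hxP
      obtain ⟨xN, hxN⟩ : ∃ m : Nat, (jN : Int) - iN = (m : Int) := ⟨jN - iN, by omega⟩
      have hjN : jN = iN + xN := by omega
      have hlce : pvLce cs iN xN = pvLce cs (iN + 1) xN + 1 := by
        rw [pvLce_rec cs iN xN hi, if_pos ⟨by omega, by rw [← hjN, h3, List.getElem?_eq_getElem hi]⟩]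
      refine ⟨?_, ?_⟩
      · rw [hxN, PySem.List.mem_pyRange_one]
        omega
      · rw [hxN] at hxv ⊢
        rw [hrow xN (by omega)] at hxv
        simp only [Int.toNat_natCast]
        rw [decide_eq_true_iff]
        omega
    · rintro ⟨hxm, hxc⟩
      obtain ⟨hx2, hxlt⟩ := PySem.List.mem_pyRange_one.mp hxm
      obtain ⟨xN, rfl⟩ : ∃ m : Nat, x = (m : Int) := ⟨x.toNat, by omega⟩
      have hxc' := of_decide_eq_true hxc
      simp only [Int.toNat_natCast] at hxc'
      have hpos : 1 ≤ pvLce cs iN xN := by omega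
      obtain ⟨hb, hcc⟩ := pvLce_pos cs iN xN hi hpos
      have hlce : pvLce cs iN xN = pvLce cs (iN + 1) xN + 1 := by
        rw [pvLce_rec cs iN xN hi, if_pos ⟨hb, hcc⟩]
      refine ⟨(pvKk_mem cs iN hi _).mpr ⟨iN + xN, by omega, hb, ?_, by omega⟩, ?_⟩
      · rw [← hcc, List.getElem?_eq_getElem hi]
      · rw [decide_eq_true_iff]
        refine ⟨by omega, by omega, ?_⟩
        rw [hrow xN (by omega)]
        omega
  have heq : (((pvSeen cs (iN + 1) cs[iN]).reverse.map (fun j => j - (iN : Int))).filter (fun k => decide (P k)))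
      = ((PySem.List.pyRange 2 (lim + 1) 1).filter (fun k => decide (k ≤ (pvLce cs iN k.toNat : Int)))) :=
    List.Perm.eq_of_pairwise (fun a b _ _ hab hba => by omega) hs1 hs2
      ((List.perm_ext_iff_of_nodup hs1.nodup hs2.nodup).mpr hset)
  rw [heq]

-- the inner fold's first component is the sparse LCE row for position i
lemma pvInner_row (cs : List Char) (iN : Nat) (hi : iN < cs.length)
    (row : PySem.Dict Int Int)
    (hrow : ∀ kN : Nat, 1 ≤ kN → row.getD (kN : Int) 0 = (pvLce cs (iN + 1) kN : Int))
    (kN : Nat) (hk : 1 ≤ kN) :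
    (((pvSeen cs (iN + 1) cs[iN]).reverse).foldl
        (fun d j => d.insert (j - (iN : Int)) (row.getD (j - (iN : Int)) 0 + 1)) PySem.Dict.empty).getD (kN : Int) 0
      = (pvLce cs iN kN : Int) := by
  have hconv : ((pvSeen cs (iN + 1) cs[iN]).reverse).foldl
        (fun d j => d.insert (j - (iN : Int)) (row.getD (j - (iN : Int)) 0 + 1)) PySem.Dict.empty
      = ((pvSeen cs (iN + 1) cs[iN]).reverse.map (fun j => j - (iN : Int))).foldl
        (fun d k => d.insert k (row.getD k 0 + 1)) PySem.Dict.empty :=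
    (List.foldl_map (f := fun j => j - (iN : Int))
      (g := fun (d : PySem.Dict Int Int) k => d.insert k (row.getD k 0 + 1))).symm
  rw [hconv, pvFoldInsert_getD (kN : Int) (fun k => row.getD k 0 + 1)]
  by_cases hex : (kN : Int) ∈ (pvSeen cs (iN + 1) cs[iN]).reverse.map (fun j => j - (iN : Int))
  · rw [if_pos hex]
    obtain ⟨jN, h1, h2, h3, he⟩ := (pvKk_mem cs iN hi _).mp hex
    have hjN : jN = iN + kN := by omega
    have hlce : pvLce cs iN kN = pvLce cs (iN + 1) kN + 1 := by
      rw [pvLce_rec cs iN kN hi, if_pos ⟨by omega, by rw [← hjN, h3, List.getElem?_eq_getElem hi]⟩]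
    rw [hrow kN hk, hlce]
    push_cast
    ring
  · rw [if_neg hex]
    have hz : pvLce cs iN kN = 0 := by
      by_contra hnz
      have hpos : 1 ≤ pvLce cs iN kN := by omega
      obtain ⟨hb, hcc⟩ := pvLce_pos cs iN kN hi hpos
      exact hex ((pvKk_mem cs iN hi _).mpr
        ⟨iN + kN, by omega, hb, by rw [← hcc, List.getElem?_eq_getElem hi], by omega⟩)
    simp [PySem.Dict.getD, PySem.Dict.get?, PySem.Dict.empty, hz]

-- the one-step lemma: processing position i preserves the invariant
lemma pvStep_inv (cs : List Char) (iN : Nat) (hi : iN < cs.length)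
    (st : List Int × PySem.Dict Int Int × PySem.Dict Char (List Int))
    (hinv : pvInv cs (iN + 1) st) :
    pvInv cs iN (pvStepB cs (cs.length : Int) st (iN : Int)) := by
  obtain ⟨h1, h2, h3⟩ := hinv
  have hc : (PySem.List.pyGet? cs (iN : Int)).elim ' ' id = cs[iN] := by
    simp [PySem.List.pyGet?, PySem.List.pyIdx?, hi]
  simp only [pvStepB, hc, h3 cs[iN]]
  have hpm : ((pvSeen cs (iN + 1) cs[iN]).reverse).foldl
      (fun (st2 : PySem.Dict Int Int × Int) j =>
        (st2.1.insert (j - (iN : Int)) (st.2.1.getD (j - (iN : Int)) 0 + 1),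
         if st2.2 = 0 ∧ 2 ≤ j - (iN : Int) ∧ j - (iN : Int) ≤ PySem.Int.floordiv ((cs.length : Int) - (iN : Int)) 2 ∧ j - (iN : Int) ≤ st.2.1.getD (j - (iN : Int)) 0 + 1 then j - (iN : Int) else st2.2))
      (PySem.Dict.empty, 0)
      = (((pvSeen cs (iN + 1) cs[iN]).reverse).foldl
          (fun d j => d.insert (j - (iN : Int)) (st.2.1.getD (j - (iN : Int)) 0 + 1)) PySem.Dict.empty,
         ((pvSeen cs (iN + 1) cs[iN]).reverse).foldl
          (fun b j => if b = 0 ∧ 2 ≤ j - (iN : Int) ∧ j - (iN : Int) ≤ PySem.Int.floordiv ((cs.length : Int) - (iN : Int)) 2 ∧ j - (iN : Int) ≤ st.2.1.getD (j - (iN : Int)) 0 + 1 then j - (iN : Int) else b) 0) :=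
    PySem.List.foldl_prod_mk
      (fun (d : PySem.Dict Int Int) j => d.insert (j - (iN : Int)) (st.2.1.getD (j - (iN : Int)) 0 + 1))
      (fun (b : Int) j => if b = 0 ∧ 2 ≤ j - (iN : Int) ∧ j - (iN : Int) ≤ PySem.Int.floordiv ((cs.length : Int) - (iN : Int)) 2 ∧ j - (iN : Int) ≤ st.2.1.getD (j - (iN : Int)) 0 + 1 then j - (iN : Int) else b)
      _ _ _
  rw [hpm]
  refine ⟨?_, ?_, ?_⟩
  · -- best component
    show (_ :: st.1) = _
    have hr : List.range' iN (cs.length - iN) = iN :: List.range' (iN + 1) (cs.length - (iN + 1)) := by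
      have : cs.length - iN = (cs.length - (iN + 1)) + 1 := by omega
      rw [this, List.range'_succ]
    rw [hr, List.map_cons, ← h1]
    congr 1
    exact pvInner_best cs iN hi st.2.1 h2
  · -- row component
    intro kN hk
    exact pvInner_row cs iN hi st.2.1 h2 kN hk
  · -- seen component
    intro c'
    show (PySem.Dict.insert _ _ _).getD c' [] = _
    by_cases hcc : c' = cs[iN]
    · subst hcc
      rw [PySem.Dict.getD_insert_self]
      rw [pvSeen_cons cs iN cs[iN] hi, if_pos (List.getElem?_eq_getElem hi)]
    · rw [PySem.Dict.getD_insert_of_ne _ _ _ hcc, h3 c']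
      rw [pvSeen_cons cs iN c' hi, if_neg (by intro h
                                              rw [List.getElem?_eq_getElem hi] at h
                                              exact hcc (Option.some.inj h).symm)]
      simp

-- the backward fold establishes the invariant down to 0
lemma pvFold_inv (cs : List Char) : ∀ (t : Nat), t ≤ cs.length →
    pvInv cs (cs.length - t)
      (((List.range t).map (fun (k : Nat) => ((cs.length : Int) - 1) - (k : Int))).foldl
        (pvStepB cs (cs.length : Int)) ([], PySem.Dict.empty, PySem.Dict.empty)) := by
  intro t
  induction t with
  | zero =>
    intro _
    refine ⟨by simp, fun kN hk => ?_, fun c => ?_⟩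
    · simp [PySem.Dict.getD, PySem.Dict.get?, PySem.Dict.empty,
        pvLce_zero cs cs.length kN (by omega)]
    · simp [PySem.Dict.getD, PySem.Dict.get?, PySem.Dict.empty, pvSeen]
  | succ t ih =>
    intro ht
    rw [List.range_succ, List.map_append, List.foldl_append]
    simp only [List.map_cons, List.map_nil, List.foldl_cons, List.foldl_nil]
    obtain ⟨j, hj⟩ : ∃ j, cs.length - t = j + 1 := ⟨cs.length - t - 1, by omega⟩
    have he : ((cs.length : Int) - 1) - t = (j : Int) := by omega
    have h2 : cs.length - (t + 1) = j := by omega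
    rw [he, h2]
    exact pvStep_inv cs j (by omega) _ (hj ▸ ih (by omega))

-- B's backward fold computes exactly the per-position search results
lemma pvFold_spec (cs : List Char) :
    ((PySem.List.pyRange ((cs.length : Int) - 1) (-1) (-1)).foldl (pvStepB cs (cs.length : Int))
      ([], PySem.Dict.empty, PySem.Dict.empty)).1
      = (List.range cs.length).map (fun i => pvBestSpec cs i) := by
  rw [pvRange_down]
  have h := (pvFold_inv cs cs.length (le_refl _)).1
  simpa [List.range_eq_range'] using h

-- the two passes produce the same parts list
lemma pvLoops_agree (cs : List Char) (fuel : Nat) : ∀ (i : Int), 0 ≤ i →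
    ∀ (acc : List (List Char)),
    pvLoopA cs (cs.length : Int) fuel i acc
      = pvLoopB cs (cs.length : Int) ((List.range cs.length).map (fun j => pvBestSpec cs j)) fuel i acc := by
  induction fuel with
  | zero => intro i _ acc; rfl
  | succ fuel ih =>
    intro i hi acc
    simp only [pvLoopA, pvLoopB]
    by_cases hlt : i < (cs.length : Int)
    · rw [if_pos hlt, if_pos hlt]
      obtain ⟨iN, rfl⟩ : ∃ m : Nat, i = (m : Int) := ⟨i.toNat, by omega⟩
      have hiN : iN < cs.length := by exact_mod_cast hlt
      have hgetD : PySem.List.pyGetD ((List.range cs.length).map (fun j => pvBestSpec cs j)) (iN : Int) 0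
          = pvBestSpec cs iN := by
        rw [PySem.List.pyGetD_natCast, PySem.List.getD_map_range _ _ _ _ hiN]
      rw [pvBest_agree cs iN, hgetD]
      by_cases hb0 : pvBestSpec cs iN = 0
      · rw [if_pos hb0]
        simp only [hb0, ne_eq, not_true_eq_false, if_false]
        exact ih ((iN : Int) + 1) (by omega) _
      · rw [if_neg hb0]
        have h2 : 2 ≤ pvBestSpec cs iN := (pvBestSpec_nonneg cs iN).resolve_left hb0
        simp only [ne_eq, hb0, not_false_eq_true, if_true]
        exact ih ((iN : Int) + 2 * pvBestSpec cs iN) (by omega) _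
    · rw [if_neg hlt, if_neg hlt]

-- ===== VERDICT (by name: the statement is the Claim_ definition above) =====
theorem merge_repeating_substrings_spec : Claim_equal_merge_repeating_substrings := by
  intro s _
  unfold Spec_merge_repeating_substrings
  simp only [merge_repeating_substrings, merge_repeating_substrings_alt]
  rw [pvFold_spec s.toList, pvLoops_agree s.toList (s.toList.length + 1) 0 le_rfl []]
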